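-- pv_equiv track=rewrite | github.com/joaotinti75/Pygame | tetris.py | find_near_func
-- ===== SOURCE A (Python) =====
-- def find_near_func(y_pos, pos_list):
--     first_list = []
--     second_list = []
--     negative_list = []
--     for num, element in enumerate(pos_list):
--         first_list.append(y_pos - element[1])
--     for element in first_list:
--         if element > 0:
--             second_list.append(element)
--         else:
--             negative_list.append(element)
--     if second_list == []:
--         negative_list = [abs(element) for element in negative_list]
--         return y_pos + min(negative_list)
--     else:
--         return y_pos - min(second_list)
-- ===== SOURCE B (Python) =====
-- def find_near_func(y_pos, pos_list):
--     vs = sorted((element[1] for element in pos_list), reverse=True)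
--     for v in vs:
--         if v < y_pos:
--             return v
--     return vs[-1]
-- ===== Notes on version B (the rewrite author's own statement) =====
-- stated objective: alternative
-- what changed: B sorts the y-values in descending order and returns the first one strictly below y_pos (a sort-then-scan with early return), falling back to the last sorted element (the minimum); A instead builds a difference list, partitions it by sign and folds abs/min back out.
import Mathlib
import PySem

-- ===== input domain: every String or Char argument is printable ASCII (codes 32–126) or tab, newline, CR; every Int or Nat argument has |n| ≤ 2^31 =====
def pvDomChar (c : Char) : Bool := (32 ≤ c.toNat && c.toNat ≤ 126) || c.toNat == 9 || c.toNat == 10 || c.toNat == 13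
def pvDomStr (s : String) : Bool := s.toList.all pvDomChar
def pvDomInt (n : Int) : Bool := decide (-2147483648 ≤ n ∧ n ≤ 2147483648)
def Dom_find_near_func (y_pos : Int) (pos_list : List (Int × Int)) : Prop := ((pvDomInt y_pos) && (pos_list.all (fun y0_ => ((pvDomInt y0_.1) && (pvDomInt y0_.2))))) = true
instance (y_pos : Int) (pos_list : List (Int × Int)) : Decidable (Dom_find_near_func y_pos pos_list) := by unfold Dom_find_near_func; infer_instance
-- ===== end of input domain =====

-- B sorts the y-values descending and scans for the first value strictly below
-- y_pos (falling back to the last, i.e. smallest), replacing A's difference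
-- lists and sign partition (alternative algorithm, sort-then-scan).

-- ===== PORT A =====
def find_near_func (y_pos : Int) (pos_list : List (Int × Int)) : Int :=
  -- first loop: first_list.append(y_pos - element[1])
  let first_list : List Int := pos_list.foldl (fun acc element => acc ++ [y_pos - element.2]) []
  -- second loop: one pass appending to second_list / negative_list
  let sn : List Int × List Int := first_list.foldl
    (fun p element => if element > 0 then (p.1 ++ [element], p.2) else (p.1, p.2 ++ [element])) ([], [])
  if sn.1 = [] then
    let negative_list := sn.2.map (fun element => |element|)
    -- min(negative_list); nonempty under Pre_ (pos_list ≠ []), .getD 0 is unreachable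
    y_pos + (PySem.List.min? negative_list (fun x => x)).getD 0
  else
    y_pos - (PySem.List.min? sn.1 (fun x => x)).getD 0

-- ===== PORT B =====
def find_near_func_alt (y_pos : Int) (pos_list : List (Int × Int)) : Int :=
  -- vs = sorted((element[1] for element in pos_list), reverse=True)
  let vs : List Int := PySem.List.sorted (pos_list.map (fun element => element.2)) (fun x => x) true
  -- for v in vs: if v < y_pos: return v
  match vs.find? (fun v => decide (v < y_pos)) with
  | some v => v
  -- return vs[-1]; nonempty under Pre_ (pos_list ≠ []), .getD 0 is unreachable
  | none => (PySem.List.pyGet? vs (-1)).getD 0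

-- ===== PRECONDITION & SPEC =====
-- Pre_ excludes only the empty pos_list, on which A raises ValueError (min of
-- an empty list) and B raises IndexError (vs[-1] on an empty list).
def Pre_find_near_func (y_pos : Int) (pos_list : List (Int × Int)) : Prop := pos_list ≠ []
instance (y_pos : Int) (pos_list : List (Int × Int)) : Decidable (Pre_find_near_func y_pos pos_list) := by unfold Pre_find_near_func; infer_instance
def pvWitness_find_near_func : Int × (List (Int × Int)) := (5, [(0, 3), (1, 9)])

def Spec_find_near_func (y_pos : Int) (pos_list : List (Int × Int)) (out : Int) : Prop := out = find_near_func_alt y_pos pos_list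
instance (y_pos : Int) (pos_list : List (Int × Int)) (out : Int) : Decidable (Spec_find_near_func y_pos pos_list out) := by unfold Spec_find_near_func; infer_instance

-- ===== CLAIM (what is proved, stated in full; the proofs are below) =====
def Claim_equal_find_near_func : Prop := ∀ (y_pos : Int) (pos_list : List (Int × Int)), Dom_find_near_func y_pos pos_list → Pre_find_near_func y_pos pos_list → Spec_find_near_func y_pos pos_list (find_near_func y_pos pos_list)

-- ===== LEMMAS AND PROOFS =====

-- canonical value both ports are proved equal to: the max of the values
-- strictly below y_pos, else the overall min
def pvCanon (y_pos : Int) (vs : List Int) : Int :=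
  let below := vs.filter (fun v => v < y_pos)
  if below ≠ [] then (PySem.List.max? below (fun x => x)).getD 0
  else (PySem.List.min? vs (fun x => x)).getD 0

-- A's single partition loop builds the two filters.
theorem pv_partition (l : List Int) (a b : List Int) :
    l.foldl (fun p element => if element > 0 then (p.1 ++ [element], p.2) else (p.1, p.2 ++ [element])) (a, b)
    = (a ++ l.filter (fun e => e > 0), b ++ l.filter (fun e => !(e > 0))) := by
  induction l generalizing a b with
  | nil => simp
  | cons h t ih =>
    by_cases hp : h > 0 <;> simp [List.foldl_cons, hp, ih]

-- fold of min over a (c - ·)-image is c - fold of max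
theorem pv_min_map_sub (c : Int) (v : Int) (t : List Int) :
    (t.map (fun x => c - x)).foldl min (c - v) = c - t.foldl max v := by
  induction t generalizing v with
  | nil => simp
  | cons h t ih =>
    simp only [List.map_cons, List.foldl_cons]
    rw [show min (c - v) (c - h) = c - max v h from by omega, ih]

-- fold of min over a (· - c)-image is fold of min minus c
theorem pv_min_map_sub' (c : Int) (v : Int) (t : List Int) :
    (t.map (fun x => x - c)).foldl min (v - c) = t.foldl min v - c := by
  induction t generalizing v with
  | nil => simp
  | cons h t ih =>
    simp only [List.map_cons, List.foldl_cons]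
    rw [show min (v - c) (h - c) = min v h - c from by omega, ih]

-- positive differences correspond to values strictly below y_pos
theorem pv_filter_map (y_pos : Int) (pos_list : List (Int × Int)) :
    (pos_list.map (fun element => y_pos - element.2)).filter (fun e => e > 0)
    = ((pos_list.map (fun element => element.2)).filter (fun v => v < y_pos)).map (fun x => y_pos - x) := by
  induction pos_list with
  | nil => simp
  | cons e t ih =>
    simp only [List.map_cons, List.filter_cons]
    rw [show decide (y_pos - e.2 > 0) = decide (e.2 < y_pos) from by
      simp only [decide_eq_decide]; omega]
    by_cases h : e.2 < y_pos <;> simp [h, ih]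

-- A computes the canonical value
theorem pv_A_eq_canon (y_pos : Int) (pos_list : List (Int × Int)) (hpre : pos_list ≠ []) :
    find_near_func y_pos pos_list = pvCanon y_pos (pos_list.map (fun element => element.2)) := by
  unfold find_near_func pvCanon
  simp only [PySem.List.foldl_append_singleton_eq_map, List.nil_append, pv_partition]
  have hff := pv_filter_map y_pos pos_list
  by_cases hb : ((pos_list.map (fun element => element.2)).filter (fun v => v < y_pos)) = []
  · simp only [hb, hff, List.map_nil, ne_eq, not_true_eq_false, if_false, if_true]
    have hall : ∀ x ∈ pos_list.map (fun element => y_pos - element.2), ¬ (x > 0) := by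
      intro x hx hgt
      have : x ∈ (pos_list.map (fun element => y_pos - element.2)).filter (fun e => e > 0) := by
        rw [List.mem_filter]; exact ⟨hx, by simpa using hgt⟩
      rw [hff, hb] at this
      simp at this
    have hneg : (pos_list.map (fun element => y_pos - element.2)).filter (fun e => !(e > 0))
        = pos_list.map (fun element => y_pos - element.2) := by
      apply List.filter_eq_self.mpr
      intro x hx
      simp [hall x hx]
    rw [hneg]
    have habs : (pos_list.map (fun element => y_pos - element.2)).map (fun element => |element|)
        = (pos_list.map (fun element => element.2)).map (fun x => x - y_pos) := by
      rw [List.map_map, List.map_map]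
      apply List.map_congr_left
      intro e he
      simp only [Function.comp]
      have := hall (y_pos - e.2) (List.mem_map_of_mem he)
      rw [abs_of_nonpos (by omega)]
      ring
    rw [habs]
    obtain ⟨p, t, ht⟩ : ∃ p t, pos_list = p :: t := by
      cases pos_list with
      | nil => exact absurd rfl hpre
      | cons p t => exact ⟨p, t, rfl⟩
    subst ht
    simp only [List.map_cons, PySem.List.min?_id_cons, Option.getD_some]
    rw [pv_min_map_sub']
    omega
  · simp only [hff, hb, ne_eq, not_false_eq_true, if_true]
    obtain ⟨v, t, ht⟩ : ∃ v t, ((pos_list.map (fun element => element.2)).filter (fun v => v < y_pos)) = v :: t := by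
      cases hb' : ((pos_list.map (fun element => element.2)).filter (fun v => v < y_pos)) with
      | nil => exact absurd hb' hb
      | cons v t => exact ⟨v, t, rfl⟩
    rw [ht]
    simp only [List.map_cons, if_neg (by simp : ¬ ((y_pos - v) :: t.map (fun x => y_pos - x) = [])),
      PySem.List.min?_id_cons, PySem.List.max?_id_cons, Option.getD_some]
    rw [pv_min_map_sub]
    omega

-- B computes the canonical value
theorem pv_B_eq_canon (y_pos : Int) (pos_list : List (Int × Int)) (hpre : pos_list ≠ []) :
    find_near_func_alt y_pos pos_list = pvCanon y_pos (pos_list.map (fun element => element.2)) := by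
  unfold find_near_func_alt pvCanon
  set vs := pos_list.map (fun element => element.2) with hvs
  set s := PySem.List.sorted vs (fun x => x) true with hs
  have hperm : s.Perm vs := PySem.List.sorted_perm vs (fun x => x) true
  have hpw : s.Pairwise (fun a b => b ≤ a) := PySem.List.sorted_pairwise_rev vs (fun x => x)
  have hvne : vs ≠ [] := by simpa [hvs] using hpre
  have hsne : s ≠ [] := by
    intro h
    exact hvne (List.nil_perm.mp (h ▸ hperm))
  have hmem : ∀ x, x ∈ s ↔ x ∈ vs := fun x => hperm.mem_iff
  cases hfind : s.find? (fun v => decide (v < y_pos)) with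
  | some v =>
    simp only [hfind]
    -- v is the first (hence largest) value below y_pos
    have hv_lt : v < y_pos := by
      have := List.find?_some hfind
      simpa using this
    have hv_mem : v ∈ s := List.mem_of_find?_eq_some hfind
    have hbelow_ne : vs.filter (fun v => v < y_pos) ≠ [] := by
      intro h
      have : v ∈ vs.filter (fun v => v < y_pos) := by
        rw [List.mem_filter]; exact ⟨(hmem v).mp hv_mem, by simpa using hv_lt⟩
      rw [h] at this; simp at this
    simp only [ne_eq, hbelow_ne, not_false_eq_true, if_true]
    -- max? returns some m
    obtain ⟨m, hm⟩ : ∃ m, PySem.List.max? (vs.filter (fun v => v < y_pos)) (fun x => x) = some m := by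
      cases h' : PySem.List.max? (vs.filter (fun v => v < y_pos)) (fun x => x) with
      | none => exact absurd (((PySem.List.max?_eq_none_iff _ _).mp h')) hbelow_ne
      | some m => exact ⟨m, rfl⟩
    rw [hm, Option.getD_some]
    have hm_mem : m ∈ vs.filter (fun v => v < y_pos) := PySem.List.max?_mem hm
    have hm_max : ∀ x ∈ vs.filter (fun v => v < y_pos), x ≤ m := fun x hx =>
      PySem.List.max?_isMax hm x hx
    -- v ≤ m since v ∈ filter
    have hv_le_m : v ≤ m := hm_max v (by
      rw [List.mem_filter]; exact ⟨(hmem v).mp hv_mem, by simpa using hv_lt⟩)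
    -- m ≤ v: m ∈ s and m < y_pos; v is the first element of s with that property,
    -- and s is descending, so every later element is ≤ v
    obtain ⟨l₁, l₂, hsplit, hbefore⟩ :
        ∃ l₁ l₂, s = l₁ ++ v :: l₂ ∧ ∀ b ∈ l₁, ¬ ((fun v => decide (v < y_pos)) b = true) := by
      have := List.find?_eq_some_iff_append.mp hfind
      obtain ⟨_, l₁, l₂, h1, h2⟩ := this
      exact ⟨l₁, l₂, h1, fun b hb => by simpa using h2 b hb⟩
    have hm_le_v : m ≤ v := by
      have hm_in_s : m ∈ s := (hmem m).mpr (List.mem_filter.mp hm_mem).1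
      have hm_lt : m < y_pos := by
        have := (List.mem_filter.mp hm_mem).2; simpa using this
      rw [hsplit] at hm_in_s
      rcases List.mem_append.mp hm_in_s with h1 | h2
      · exact absurd (by simpa using hm_lt) (by simpa using hbefore m h1)
      · rcases List.mem_cons.mp h2 with h | h
        · omega
        · -- m ∈ l₂, v before m in descending list
          have := hpw
          rw [hsplit] at this
          have h' := (List.pairwise_append.mp this).2.1
          exact (List.pairwise_cons.mp h').1 m h
    omega
  | none =>
    simp only [hfind]
    -- no value below y_pos
    have hnone : ∀ x ∈ s, ¬ (x < y_pos) := by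
      intro x hx
      have := List.find?_eq_none.mp hfind x hx
      simpa using this
    have hbelow : vs.filter (fun v => v < y_pos) = [] := by
      apply List.filter_eq_nil_iff.mpr
      intro x hx
      simpa using hnone x ((hmem x).mpr hx)
    simp only [hbelow, ne_eq, not_true_eq_false, if_false]
    rw [PySem.List.pyGet?_neg_one]
    obtain ⟨m, hm⟩ : ∃ m, PySem.List.min? vs (fun x => x) = some m := by
      cases h' : PySem.List.min? vs (fun x => x) with
      | none => exact absurd (((PySem.List.min?_eq_none_iff _ _).mp h')) hvne
      | some m => exact ⟨m, rfl⟩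
    rw [hm, Option.getD_some]
    have hlast? : s.getLast? = some (s.getLast hsne) := List.getLast?_eq_some_getLast hsne
    rw [hlast?, Option.getD_some]
    have hlast_mem : s.getLast hsne ∈ s := List.getLast_mem hsne
    have hlast_min : ∀ x ∈ s, s.getLast hsne ≤ x := by
      intro x hx
      have hpwg := List.pairwise_iff_getElem.mp hpw
      obtain ⟨i, hi, hxi⟩ := List.getElem_of_mem hx
      have hpos : 0 < s.length := List.length_pos_iff.mpr hsne
      have hlast_eq : s.getLast hsne = s[s.length - 1]'(by omega) := List.getLast_eq_getElem hsne
      rcases eq_or_lt_of_le (Nat.le_pred_of_lt hi) with h | h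
      · rw [hlast_eq, ← hxi]
        have : i = s.length - 1 := h
        simp [this]
      · rw [hlast_eq, ← hxi]
        exact hpwg i (s.length - 1) (by omega) (by omega) h
    have h1 : m ≤ s.getLast hsne := PySem.List.min?_isMin hm _ ((hmem _).mp hlast_mem)
    have h2 : s.getLast hsne ≤ m := hlast_min m ((hmem m).mpr (PySem.List.min?_mem hm))
    omega

-- ===== VERDICT (by name: the statement is the Claim_ definition above) =====
theorem find_near_func_spec : Claim_equal_find_near_func := by
  intro y_pos pos_list _ hpre
  unfold Spec_find_near_func
  rw [pv_A_eq_canon y_pos pos_list hpre, pv_B_eq_canon y_pos pos_list hpre]
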